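-- pv_equiv track=rewrite | github.com/DhruvTilva/swarm | agents/frontend.py | _design_style
-- ===== SOURCE A (Python) =====
-- from typing import Any, Dict, List, Tuple
--
-- def _design_style(task: str, adjectives: List[str]) -> Tuple[str, str]:
--     lowered = task.lower()
--     if any(k in lowered for k in ["productivity", "todo", "task", "tool"]):
--         return "#58a6ff", "Inter"
--     if any(k in lowered for k in ["media", "video", "image", "creative"]):
--         return "#bc8cff", "Plus Jakarta Sans"
--     if any(k in lowered for k in ["finance", "analytics", "data", "billing"]):
--         return "#3fb950", "DM Sans"
--     if any(k in lowered for k in ["chat", "social", "message", "community"]):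
--         return "#ff6e96", "DM Sans"
--     if any(k in lowered for k in ["utility", "technical", "api", "service"]):
--         return "#f0883e", "JetBrains Mono"
--     if "creative" in adjectives:
--         return "#bc8cff", "Plus Jakarta Sans"
--     return "#58a6ff", "Inter"
-- ===== SOURCE B (Python) =====
-- from typing import List, Tuple
--
-- # keyword -> priority-group index (lower index = higher priority)
-- _GROUP = [
--     ("productivity", 0), ("todo", 0), ("task", 0), ("tool", 0),
--     ("media", 1), ("video", 1), ("image", 1), ("creative", 1),
--     ("finance", 2), ("analytics", 2), ("data", 2), ("billing", 2),
--     ("chat", 3), ("social", 3), ("message", 3), ("community", 3),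
--     ("utility", 4), ("technical", 4), ("api", 4), ("service", 4),
-- ]
--
-- # styles indexed by group; 5 = 'creative' adjective, 6 = default
-- _STYLES = [
--     ("#58a6ff", "Inter"),
--     ("#bc8cff", "Plus Jakarta Sans"),
--     ("#3fb950", "DM Sans"),
--     ("#ff6e96", "DM Sans"),
--     ("#f0883e", "JetBrains Mono"),
--     ("#bc8cff", "Plus Jakarta Sans"),
--     ("#58a6ff", "Inter"),
-- ]
--
-- def _design_style(task: str, adjectives: List[str]) -> Tuple[str, str]:
--     # Collect every matching priority index exhaustively, then take the minimum:
--     # no ordered branch chain, the best (smallest) priority wins.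
--     lowered = task.lower()
--     hits = [g for kw, g in _GROUP if kw in lowered]
--     if "creative" in adjectives:
--         hits.append(5)
--     hits.append(6)
--     return _STYLES[min(hits)]
-- ===== Notes on version B (the rewrite author's own statement) =====
-- stated objective: alternative
-- what changed: Instead of A's short-circuiting chain of five keyword-group tests, B matches every keyword exhaustively against a keyword->priority map, collects all matching priority indices (plus sentinel indices for the 'creative' adjective and the default), and returns the style at the minimum index.
import Mathlib
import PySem

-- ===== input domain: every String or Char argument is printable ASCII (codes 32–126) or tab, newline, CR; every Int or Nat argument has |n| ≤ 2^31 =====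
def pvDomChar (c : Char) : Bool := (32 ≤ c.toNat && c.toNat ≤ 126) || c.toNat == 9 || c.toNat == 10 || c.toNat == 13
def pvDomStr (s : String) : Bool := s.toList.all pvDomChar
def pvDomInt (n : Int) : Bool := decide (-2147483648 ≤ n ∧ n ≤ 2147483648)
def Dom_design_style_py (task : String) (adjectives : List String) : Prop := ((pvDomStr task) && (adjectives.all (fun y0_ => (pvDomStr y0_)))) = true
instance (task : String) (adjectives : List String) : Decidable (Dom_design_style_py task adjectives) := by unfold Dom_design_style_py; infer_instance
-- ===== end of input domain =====

-- B replaces A's short-circuiting five-branch if-chain by an exhaustive keyword match: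
-- it collects the priority index of EVERY matching keyword and takes the minimum (objective: alternative).

-- ===== PORT A =====
def design_style_py (task : String) (adjectives : List String) : String × String :=
  let lowered := PySem.Str.lower task
  if ["productivity", "todo", "task", "tool"].any (fun k => PySem.Str.isIn k lowered) then
    ("#58a6ff", "Inter")
  else if ["media", "video", "image", "creative"].any (fun k => PySem.Str.isIn k lowered) then
    ("#bc8cff", "Plus Jakarta Sans")
  else if ["finance", "analytics", "data", "billing"].any (fun k => PySem.Str.isIn k lowered) then
    ("#3fb950", "DM Sans")
  else if ["chat", "social", "message", "community"].any (fun k => PySem.Str.isIn k lowered) then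
    ("#ff6e96", "DM Sans")
  else if ["utility", "technical", "api", "service"].any (fun k => PySem.Str.isIn k lowered) then
    ("#f0883e", "JetBrains Mono")
  else if adjectives.contains "creative" then
    ("#bc8cff", "Plus Jakarta Sans")
  else
    ("#58a6ff", "Inter")

-- ===== PORT B =====
-- keyword -> priority-group index (lower index = higher priority)
def pvGroup : List (String × Nat) :=
  [ ("productivity", 0), ("todo", 0), ("task", 0), ("tool", 0),
    ("media", 1), ("video", 1), ("image", 1), ("creative", 1),
    ("finance", 2), ("analytics", 2), ("data", 2), ("billing", 2),
    ("chat", 3), ("social", 3), ("message", 3), ("community", 3),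
    ("utility", 4), ("technical", 4), ("api", 4), ("service", 4) ]

-- styles indexed by group; 5 = 'creative' adjective, 6 = default
def pvStyles : List (String × String) :=
  [ ("#58a6ff", "Inter"),
    ("#bc8cff", "Plus Jakarta Sans"),
    ("#3fb950", "DM Sans"),
    ("#ff6e96", "DM Sans"),
    ("#f0883e", "JetBrains Mono"),
    ("#bc8cff", "Plus Jakarta Sans"),
    ("#58a6ff", "Inter") ]

def design_style_py_alt (task : String) (adjectives : List String) : String × String :=
  let lowered := PySem.Str.lower task
  let hits := pvGroup.filterMap (fun p => if PySem.Str.isIn p.1 lowered then some p.2 else none)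
  let hits := if adjectives.contains "creative" then hits ++ [5] else hits
  let hits := hits ++ [6]
  -- Python min(hits): hits always ends with 6, so min? is some and the getD default is unreachable
  let m := (PySem.List.min? hits (fun x => x)).getD 6
  -- Python _STYLES[m]: m ≤ 6 is always in range, so the getD default is unreachable
  pvStyles.getD m ("#58a6ff", "Inter")

-- ===== PRECONDITION & SPEC =====
def Spec_design_style_py (task : String) (adjectives : List String) (out : String × String) : Prop := out = design_style_py_alt task adjectives
instance (task : String) (adjectives : List String) (out : String × String) : Decidable (Spec_design_style_py task adjectives out) := by unfold Spec_design_style_py; infer_instance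

-- ===== CLAIM (what is proved, stated in full; the proofs are below) =====
def Claim_equal_design_style_py : Prop := ∀ (task : String) (adjectives : List String), Dom_design_style_py task adjectives → Spec_design_style_py task adjectives (design_style_py task adjectives)

-- ===== LEMMAS AND PROOFS =====

-- a minimum is the unique member that bounds the list from below
theorem pv_min?_eq_some {l : List Nat} {m : Nat} (hm : m ∈ l) (hlb : ∀ y ∈ l, m ≤ y) :
    PySem.List.min? l (fun x => x) = some m := by
  cases h : PySem.List.min? l (fun x => x) with
  | none =>
      rw [PySem.List.min?_eq_none_iff] at h
      subst h; simp at hm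
  | some m' =>
      have h1 : m' ∈ l := PySem.List.min?_mem h
      have h2 := PySem.List.min?_isMin h
      have ha : m' ≤ m := h2 m hm
      have hb := hlb m' h1
      simp only [Option.some.injEq]
      omega

-- an element produced by a matching keyword is in the match list
theorem pv_mem_hits {lowered kw : String} {g : Nat} (hp : (kw, g) ∈ pvGroup)
    (h : PySem.Str.isIn kw lowered = true) :
    g ∈ pvGroup.filterMap (fun p => if PySem.Str.isIn p.1 lowered then some p.2 else none) :=
  List.mem_filterMap.mpr ⟨(kw, g), hp, by rw [if_pos h]⟩

-- if every keyword of priority below k fails, every matched index is ≥ k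
theorem pv_lb {lowered : String} {k : Nat}
    (h : ∀ p ∈ pvGroup, p.2 < k → PySem.Str.isIn p.1 lowered = false) :
    ∀ y ∈ pvGroup.filterMap (fun p => if PySem.Str.isIn p.1 lowered then some p.2 else none), k ≤ y := by
  intro y hy
  obtain ⟨p, hp, hf⟩ := List.mem_filterMap.mp hy
  by_cases hin : PySem.Str.isIn p.1 lowered = true
  · rw [if_pos hin, Option.some.injEq] at hf
    subst hf
    by_contra hlt
    have hfls := h p hp (by omega)
    rw [hfls] at hin
    cases hin
  · rw [if_neg hin] at hf
    cases hf

-- ===== VERDICT (by name: the statement is the Claim_ definition above) =====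
theorem design_style_py_spec : Claim_equal_design_style_py := by
  intro task adjectives _
  unfold Spec_design_style_py design_style_py design_style_py_alt
  simp only []
  generalize PySem.Str.lower task = lowered
  set fm := List.filterMap (fun p => if PySem.Str.isIn p.1 lowered = true then some p.2 else none) pvGroup with hfm
  set hits := (if adjectives.contains "creative" = true then fm ++ [5] else fm) ++ [6] with hhits
  have hmemhits : ∀ {g : Nat}, g ∈ fm → g ∈ hits := by
    intro g hg
    rw [hhits]
    by_cases hcc : adjectives.contains "creative" = true
    · rw [if_pos hcc]; exact List.mem_append_left _ (List.mem_append_left _ hg)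
    · rw [if_neg hcc]; exact List.mem_append_left _ hg
  have hlbhits : ∀ k : Nat, k ≤ 5 → (∀ y ∈ fm, k ≤ y) → ∀ y ∈ hits, k ≤ y := by
    intro k hk5 hf y hy
    rw [hhits] at hy
    rcases List.mem_append.mp hy with hy | hy
    · by_cases hcc : adjectives.contains "creative" = true
      · rw [if_pos hcc] at hy
        rcases List.mem_append.mp hy with hy | hy
        · exact hf y hy
        · simp at hy; omega
      · rw [if_neg hcc] at hy; exact hf y hy
    · simp at hy; omega
  by_cases h0 : (["productivity", "todo", "task", "tool"].any fun k => PySem.Str.isIn k lowered) = true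
  · rw [if_pos h0]
    obtain ⟨kw, hkwmem, hkwin⟩ := List.any_eq_true.mp h0
    have hg : (kw, (0 : Nat)) ∈ pvGroup := by fin_cases hkwmem <;> decide
    have hmem : (0 : Nat) ∈ fm := by rw [hfm]; exact pv_mem_hits hg hkwin
    have hmin : PySem.List.min? hits (fun x => x) = some 0 :=
      pv_min?_eq_some (hmemhits hmem) (fun y _ => Nat.zero_le y)
    rw [hmin]; rfl
  · rw [if_neg h0]
    have hA : ∀ x ∈ (["productivity", "todo", "task", "tool"] : List String), PySem.Str.isIn x lowered = false := by
      intro x hx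
      rw [← Bool.not_eq_true]
      exact fun hcon => h0 (List.any_eq_true.mpr ⟨x, hx, hcon⟩)
    by_cases h1 : (["media", "video", "image", "creative"].any fun k => PySem.Str.isIn k lowered) = true
    · rw [if_pos h1]
      obtain ⟨kw, hkwmem, hkwin⟩ := List.any_eq_true.mp h1
      have hg : (kw, (1 : Nat)) ∈ pvGroup := by fin_cases hkwmem <;> decide
      have hmem : (1 : Nat) ∈ fm := by rw [hfm]; exact pv_mem_hits hg hkwin
      have hfalse : ∀ p ∈ pvGroup, p.2 < 1 → PySem.Str.isIn p.1 lowered = false := by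
        intro p hp hlt
        simp only [pvGroup] at hp
        fin_cases hp <;> first
          | exact absurd hlt (by decide)
          | exact hA _ (by decide)
      have hmin : PySem.List.min? hits (fun x => x) = some 1 :=
        pv_min?_eq_some (hmemhits hmem)
          (hlbhits 1 (by omega) (by rw [hfm]; exact pv_lb hfalse))
      rw [hmin]; rfl
    · rw [if_neg h1]
      have hB : ∀ x ∈ (["media", "video", "image", "creative"] : List String), PySem.Str.isIn x lowered = false := by
        intro x hx
        rw [← Bool.not_eq_true]
        exact fun hcon => h1 (List.any_eq_true.mpr ⟨x, hx, hcon⟩)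
      by_cases h2 : (["finance", "analytics", "data", "billing"].any fun k => PySem.Str.isIn k lowered) = true
      · rw [if_pos h2]
        obtain ⟨kw, hkwmem, hkwin⟩ := List.any_eq_true.mp h2
        have hg : (kw, (2 : Nat)) ∈ pvGroup := by fin_cases hkwmem <;> decide
        have hmem : (2 : Nat) ∈ fm := by rw [hfm]; exact pv_mem_hits hg hkwin
        have hfalse : ∀ p ∈ pvGroup, p.2 < 2 → PySem.Str.isIn p.1 lowered = false := by
          intro p hp hlt
          simp only [pvGroup] at hp
          fin_cases hp <;> first
            | exact absurd hlt (by decide)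
            | exact hA _ (by decide)
            | exact hB _ (by decide)
        have hmin : PySem.List.min? hits (fun x => x) = some 2 :=
          pv_min?_eq_some (hmemhits hmem)
            (hlbhits 2 (by omega) (by rw [hfm]; exact pv_lb hfalse))
        rw [hmin]; rfl
      · rw [if_neg h2]
        have hC : ∀ x ∈ (["finance", "analytics", "data", "billing"] : List String), PySem.Str.isIn x lowered = false := by
          intro x hx
          rw [← Bool.not_eq_true]
          exact fun hcon => h2 (List.any_eq_true.mpr ⟨x, hx, hcon⟩)
        by_cases h3 : (["chat", "social", "message", "community"].any fun k => PySem.Str.isIn k lowered) = true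
        · rw [if_pos h3]
          obtain ⟨kw, hkwmem, hkwin⟩ := List.any_eq_true.mp h3
          have hg : (kw, (3 : Nat)) ∈ pvGroup := by fin_cases hkwmem <;> decide
          have hmem : (3 : Nat) ∈ fm := by rw [hfm]; exact pv_mem_hits hg hkwin
          have hfalse : ∀ p ∈ pvGroup, p.2 < 3 → PySem.Str.isIn p.1 lowered = false := by
            intro p hp hlt
            simp only [pvGroup] at hp
            fin_cases hp <;> first
              | exact absurd hlt (by decide)
              | exact hA _ (by decide)
              | exact hB _ (by decide)
              | exact hC _ (by decide)
          have hmin : PySem.List.min? hits (fun x => x) = some 3 :=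
            pv_min?_eq_some (hmemhits hmem)
              (hlbhits 3 (by omega) (by rw [hfm]; exact pv_lb hfalse))
          rw [hmin]; rfl
        · rw [if_neg h3]
          have hD : ∀ x ∈ (["chat", "social", "message", "community"] : List String), PySem.Str.isIn x lowered = false := by
            intro x hx
            rw [← Bool.not_eq_true]
            exact fun hcon => h3 (List.any_eq_true.mpr ⟨x, hx, hcon⟩)
          by_cases h4 : (["utility", "technical", "api", "service"].any fun k => PySem.Str.isIn k lowered) = true
          · rw [if_pos h4]
            obtain ⟨kw, hkwmem, hkwin⟩ := List.any_eq_true.mp h4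
            have hg : (kw, (4 : Nat)) ∈ pvGroup := by fin_cases hkwmem <;> decide
            have hmem : (4 : Nat) ∈ fm := by rw [hfm]; exact pv_mem_hits hg hkwin
            have hfalse : ∀ p ∈ pvGroup, p.2 < 4 → PySem.Str.isIn p.1 lowered = false := by
              intro p hp hlt
              simp only [pvGroup] at hp
              fin_cases hp <;> first
                | exact absurd hlt (by decide)
                | exact hA _ (by decide)
                | exact hB _ (by decide)
                | exact hC _ (by decide)
                | exact hD _ (by decide)
            have hmin : PySem.List.min? hits (fun x => x) = some 4 :=
              pv_min?_eq_some (hmemhits hmem)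
                (hlbhits 4 (by omega) (by rw [hfm]; exact pv_lb hfalse))
            rw [hmin]; rfl
          · rw [if_neg h4]
            have hE : ∀ x ∈ (["utility", "technical", "api", "service"] : List String), PySem.Str.isIn x lowered = false := by
              intro x hx
              rw [← Bool.not_eq_true]
              exact fun hcon => h4 (List.any_eq_true.mpr ⟨x, hx, hcon⟩)
            -- no keyword matches at all, so the match list is empty
            have hnil : fm = [] := by
              rw [hfm]
              apply List.filterMap_eq_nil_iff.mpr
              intro p hp
              have hfls : PySem.Str.isIn p.1 lowered = false := by
                simp only [pvGroup] at hp
                fin_cases hp <;> first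
                  | exact hA _ (by decide)
                  | exact hB _ (by decide)
                  | exact hC _ (by decide)
                  | exact hD _ (by decide)
                  | exact hE _ (by decide)
              rw [hfls]
              simp
            by_cases hc : adjectives.contains "creative" = true
            · rw [if_pos hc, hhits, if_pos hc, hnil]; rfl
            · rw [if_neg hc, hhits, if_neg hc, hnil]; rfl
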